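-- pv_equiv track=rewrite | github.com/dlhauer/challenges | 00-stock-run.py | stockRun
-- ===== SOURCE A (Python) =====
-- def stockRun(prices):
--     max_run = cur_run = prev_price =  0
--     for i, price in enumerate(prices):
--         cur_run += 1
--         if (i < len(prices)-1
--             and (prev_price < prices[i] > prices[i+1]
--             or prev_price > prices[i] < prices[i+1])):
--             max_run = max(cur_run, max_run)
--             cur_run = 1
--         prev_price = price
--     return max(cur_run, max_run)
-- ===== SOURCE B (Python) =====
-- def stockRun(prices):
--     n = len(prices)
--     if n == 0:
--         return 0
--     breaks = [i for i in range(n - 1)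
--               if (prices[i - 1] if i > 0 else 0) < prices[i] > prices[i + 1]
--               or (prices[i - 1] if i > 0 else 0) > prices[i] < prices[i + 1]]
--     if not breaks:
--         return n
--     lengths = [breaks[0] + 1]
--     lengths += [b2 - b1 + 1 for b1, b2 in zip(breaks, breaks[1:])]
--     lengths.append(n - breaks[-1])
--     return max(lengths)
-- ===== Notes on version B (the rewrite author's own statement) =====
-- stated objective: alternative
-- what changed: A's single increment-and-reset accumulator loop is replaced by a two-pass decomposition: first collect the breakpoint indices (local peak/valley tests, with the prev=0 start), then compute the overlapping segment lengths between breakpoints and take their maximum.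
import Mathlib
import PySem

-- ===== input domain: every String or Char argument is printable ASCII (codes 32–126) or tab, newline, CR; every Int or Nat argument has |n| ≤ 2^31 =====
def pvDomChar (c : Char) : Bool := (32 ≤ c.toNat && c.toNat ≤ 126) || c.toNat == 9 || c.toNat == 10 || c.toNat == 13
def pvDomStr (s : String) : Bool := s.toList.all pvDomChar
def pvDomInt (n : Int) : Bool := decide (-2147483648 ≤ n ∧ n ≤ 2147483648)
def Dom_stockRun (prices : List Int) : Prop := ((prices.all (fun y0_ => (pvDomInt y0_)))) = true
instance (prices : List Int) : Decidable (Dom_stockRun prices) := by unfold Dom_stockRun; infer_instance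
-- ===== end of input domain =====

-- B replaces A's increment-and-reset accumulator loop by a two-pass decomposition
-- (collect breakpoint indices, then measure overlapping segment lengths); objective: alternative.

-- ===== PORT A =====
-- loop body of A: state is (max_run, cur_run, prev_price); one enumerate item is (i, price)
def stockRunStep (prices : List Int) (s : Int × Int × Int) (ip : Int × Int) : Int × Int × Int :=
  let cur := s.2.1 + 1
  if ip.1 < (prices.length : Int) - 1 ∧
      ((s.2.2 < PySem.List.pyGetD prices ip.1 0 ∧
        PySem.List.pyGetD prices (ip.1 + 1) 0 < PySem.List.pyGetD prices ip.1 0) ∨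
       (PySem.List.pyGetD prices ip.1 0 < s.2.2 ∧
        PySem.List.pyGetD prices ip.1 0 < PySem.List.pyGetD prices (ip.1 + 1) 0))
  then (max cur s.1, 1, ip.2)
  else (s.1, cur, ip.2)

def stockRun (prices : List Int) : Int :=
  let s := (PySem.List.enumerate prices).foldl (stockRunStep prices) (0, 0, 0)
  max s.2.1 s.1

-- ===== PORT B =====
-- B's breakpoint test for an index i of range(n-1)
def stockRunBrkCond (prices : List Int) (i : Int) : Bool :=
  let prev := if 0 < i then PySem.List.pyGetD prices (i - 1) 0 else 0
  let p := PySem.List.pyGetD prices i 0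
  let nx := PySem.List.pyGetD prices (i + 1) 0
  (decide (prev < p) && decide (nx < p)) || (decide (p < prev) && decide (p < nx))

def stockRun_alt (prices : List Int) : Int :=
  let n : Int := prices.length
  if n = 0 then 0 else
  let breaks := (PySem.List.pyRange 0 (n - 1) 1).filter (stockRunBrkCond prices)
  match breaks with
  | [] => n
  | b0 :: rest =>
    let lengths := (b0 + 1) ::
      (((b0 :: rest).zip rest).map (fun p => p.2 - p.1 + 1) ++
       [n - PySem.List.pyGetD (b0 :: rest) (-1) 0])
    (PySem.List.max? lengths (fun x => x)).getD 0

-- ===== PRECONDITION & SPEC =====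
def Spec_stockRun (prices : List Int) (out : Int) : Prop := out = stockRun_alt prices
instance (prices : List Int) (out : Int) : Decidable (Spec_stockRun prices out) := by unfold Spec_stockRun; infer_instance

-- ===== CLAIM (what is proved, stated in full; the proofs are below) =====
def Claim_equal_stockRun : Prop := ∀ (prices : List Int), Dom_stockRun prices → Spec_stockRun prices (stockRun prices)

-- ===== LEMMAS AND PROOFS =====

def pvBrkN (prices : List Int) (k : Nat) : Bool :=
  decide (k + 1 < prices.length) &&
  ((decide ((if 0 < k then prices.getD (k - 1) 0 else 0) < prices.getD k 0) &&
    decide (prices.getD (k + 1) 0 < prices.getD k 0)) ||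
   (decide (prices.getD k 0 < (if 0 < k then prices.getD (k - 1) 0 else 0)) &&
    decide (prices.getD k 0 < prices.getD (k + 1) 0)))

def pvBrks (prices : List Int) (k : Nat) : List Int :=
  ((List.range k).filter (pvBrkN prices)).map Int.ofNat

def pvBStep (s : Int × Int) (b : Int) : Int × Int := (max s.1 (b - s.2 + 1), b)

def pvStateAt (prices : List Int) (k : Nat) : Int × Int × Int :=
  let st := (pvBrks prices k).foldl pvBStep (0, 0)
  (st.1, (k : Int) - st.2, if 0 < k then prices.getD (k - 1) 0 else 0)

theorem pvBrks_succ (prices : List Int) (k : Nat) :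
    pvBrks prices (k + 1) =
      pvBrks prices k ++ (if pvBrkN prices k then [(k : Int)] else []) := by
  simp [pvBrks, List.range_succ, List.filter_append]
  split_ifs <;> simp_all [List.filter]

theorem pvStep_eq (prices : List Int) (k : Nat) (p : Int) (hk : prices.getD k 0 = p)
    (_hlt : k < prices.length) :
    stockRunStep prices (pvStateAt prices k) ((k : Int), p) = pvStateAt prices (k + 1) := by
  have hc1 : ((k : Int) + 1) = ((k + 1 : Nat) : Int) := by push_cast; ring
  have hcond : ((k : Int) < (prices.length : Int) - 1 ∧
      (((if 0 < k then prices.getD (k - 1) 0 else 0) < prices.getD k 0 ∧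
        prices.getD (k + 1) 0 < prices.getD k 0) ∨
       (prices.getD k 0 < (if 0 < k then prices.getD (k - 1) 0 else 0) ∧
        prices.getD k 0 < prices.getD (k + 1) 0))) ↔ pvBrkN prices k = true := by
    unfold pvBrkN
    simp only [Bool.and_eq_true, Bool.or_eq_true, decide_eq_true_eq]
    constructor
    · rintro ⟨h1, h2⟩; exact ⟨by omega, h2⟩
    · rintro ⟨h1, h2⟩; exact ⟨by omega, h2⟩
  simp only [stockRunStep, pvStateAt, hc1, PySem.List.pyGetD_natCast]
  by_cases hb : pvBrkN prices k = true
  · rw [if_pos (hcond.mpr hb)]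
    simp only [pvBrks_succ, hb, if_true, List.foldl_append, List.foldl_cons, List.foldl_nil, pvBStep]
    simp only [Prod.mk.injEq]
    exact ⟨max_comm _ _, by omega, by simp [← hk, List.getD]⟩
  · rw [if_neg (fun hh => hb (hcond.mp hh))]
    simp only [pvBrks_succ, hb, if_false, List.append_nil, Bool.false_eq_true]
    simp only [Prod.mk.injEq, true_and]
    exact ⟨by omega, by simp [← hk, List.getD]⟩

theorem pvCond_eq (prices : List Int) (k : Nat) (h : k + 1 < prices.length) :
    stockRunBrkCond prices ((k : Nat) : Int) = pvBrkN prices k := by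
  unfold stockRunBrkCond pvBrkN
  have hc : ((k : Int)) + 1 = ((k + 1 : Nat) : Int) := by push_cast; ring
  rcases Nat.eq_zero_or_pos k with h0 | h0
  · subst h0
    simp [h, List.getD, PySem.List.pyGetD_ofNat']
  · have hm : ((k : Int)) - 1 = ((k - 1 : Nat) : Int) := by omega
    have hp : (0 : Int) < (k : Int) := by exact_mod_cast h0
    simp only [hm, hc, PySem.List.pyGetD_natCast, if_pos hp, if_pos h0, List.getD]
    simp [h]

theorem pvLoop (prices : List Int) :
    ∀ (l : List Int) (k : Nat), prices.drop k = l → k ≤ prices.length →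
      (PySem.List.enumerate l (k : Int)).foldl (stockRunStep prices) (pvStateAt prices k)
        = pvStateAt prices prices.length := by
  intro l
  induction l with
  | nil =>
    intro k hk hk2
    have h1 : prices.length ≤ k := List.drop_eq_nil_iff.mp hk
    have hlen : prices.length = k := by omega
    simp [PySem.List.enumerate, hlen]
  | cons p rest ih =>
    intro k hk hk2
    have hklen : k < prices.length := by
      by_contra h
      rw [List.drop_eq_nil_of_le (by omega)] at hk; simp at hk
    have hget : prices.getD k 0 = p := by
      have : prices.drop k = p :: rest := hk
      have h1 : prices[k]? = some p := by
        have h2 := congrArg (fun l => l[0]?) this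
        simpa [List.getElem?_drop] using h2
      simp [List.getD, h1]
    have hrest : prices.drop (k + 1) = rest := by
      have := congrArg List.tail hk; simpa [List.tail_drop] using this
    rw [PySem.List.enumerate_cons, List.foldl_cons, pvStep_eq prices k p hget hklen]
    have := ih (k + 1) hrest (by omega)
    simpa using this

theorem pvMaxLen (n : Int) : ∀ (t : List Int) (b a : Int),
    List.foldl max a (((b :: t).zip t).map (fun p => p.2 - p.1 + 1) ++
        [n - (b :: t).getLast (List.cons_ne_nil _ _)])
      = max ((t.foldl pvBStep (a, b)).1) (n - (t.foldl pvBStep (a, b)).2) := by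
  intro t
  induction t with
  | nil => intro b a; simp
  | cons c t' ih =>
    intro b a
    have hlast : (b :: c :: t').getLast (List.cons_ne_nil _ _)
        = (c :: t').getLast (List.cons_ne_nil _ _) := by
      simp [List.getLast]
    simp only [List.zip_cons_cons, List.map_cons, List.cons_append, List.foldl_cons, hlast]
    rw [ih c (max a (c - b + 1))]
    simp [pvBStep]

theorem pvBreaks_eq (prices : List Int) :
    (PySem.List.pyRange 0 ((prices.length : Int) - 1) 1).filter (stockRunBrkCond prices)
      = pvBrks prices prices.length := by
  rcases Nat.eq_zero_or_pos prices.length with h0 | h0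
  · rw [PySem.List.pyRange_one_eq_nil (by omega)]
    simp [pvBrks, h0]
  · have h1 : ((prices.length : Int) - 1 - 0).toNat = prices.length - 1 := by omega
    rw [PySem.List.pyRange_one 0 ((prices.length : Int) - 1), h1]
    have hlast : pvBrkN prices (prices.length - 1) = false := by
      unfold pvBrkN
      simp [show ¬(prices.length - 1 + 1 < prices.length) from by omega]
    have hsplit : List.range prices.length
        = List.range (prices.length - 1) ++ [prices.length - 1] := by
      have := List.range_succ (n := prices.length - 1)
      rw [← this]; congr 1; omega
    rw [List.filter_map]
    unfold pvBrks
    rw [hsplit, List.filter_append]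
    simp only [List.filter_cons, hlast, List.filter_nil, Bool.false_eq_true, if_false,
      List.append_nil]
    have hpred : ∀ k ∈ List.range (prices.length - 1),
        (stockRunBrkCond prices ∘ fun (k : Nat) => ((k : Int))) k = pvBrkN prices k := by
      intro k hkmem
      have hk : k + 1 < prices.length := by
        have := List.mem_range.mp hkmem; omega
      simp [Function.comp, pvCond_eq prices k hk]
    simp only [zero_add]
    rw [List.filter_congr hpred]
    simp [Int.ofNat_eq_natCast]

theorem stockRun_spec_aux (prices : List Int) : stockRun prices = stockRun_alt prices := by
  have hloop := pvLoop prices prices 0 (by simp) (by omega)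
  have hstate0 : pvStateAt prices 0 = (0, 0, 0) := by
    simp [pvStateAt, pvBrks]
  rw [hstate0] at hloop
  have hA : stockRun prices
      = max ((prices.length : Int) - ((pvBrks prices prices.length).foldl pvBStep (0, 0)).2)
            ((pvBrks prices prices.length).foldl pvBStep (0, 0)).1 := by
    show max _ _ = _
    rw [show PySem.List.enumerate prices = PySem.List.enumerate prices ((0 : Nat) : Int) by norm_num]
    rw [hloop]
    rfl
  rcases List.eq_nil_or_concat prices with hnil | _
  · subst hnil; rfl
  · have hne : prices ≠ [] := by rintro rfl; simp_all
    have hn0 : (prices.length : Int) ≠ 0 := by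
      simp [List.length_eq_zero_iff, hne]
    have halt : stockRun_alt prices
        = (match pvBrks prices prices.length with
           | [] => (prices.length : Int)
           | b0 :: rest =>
             (PySem.List.max? ((b0 + 1) ::
               (((b0 :: rest).zip rest).map (fun p => p.2 - p.1 + 1) ++
                [(prices.length : Int) - PySem.List.pyGetD (b0 :: rest) (-1) 0]))
               (fun x => x)).getD 0) := by
      unfold stockRun_alt
      rw [if_neg hn0, pvBreaks_eq]
    cases hbr : pvBrks prices prices.length with
    | nil =>
      rw [hbr] at hA
      rw [hA, halt, hbr]
      simp only [List.foldl_nil]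
      rw [max_eq_left (by omega)]
      omega
    | cons b0 rest =>
      have hmem : b0 ∈ pvBrks prices prices.length := by
        rw [hbr]; exact List.mem_cons_self
      obtain ⟨j, _, hj⟩ := List.mem_map.mp hmem
      have hb0 : (0 : Int) ≤ b0 := by
        rw [← hj, Int.ofNat_eq_natCast]; positivity
      have halt2 : stockRun_alt prices
          = (PySem.List.max? ((b0 + 1) ::
              (((b0 :: rest).zip rest).map (fun p => p.2 - p.1 + 1) ++
               [(prices.length : Int) -
                PySem.List.pyGetD (b0 :: rest) (-1) 0])) (fun x => x)).getD 0 := by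
        rw [halt, hbr]
      rw [hbr] at hA
      rw [hA, halt2, PySem.List.pyGetD_neg_one (b0 :: rest) 0 (List.cons_ne_nil _ _),
        PySem.List.max?_id_cons]
      simp only [Option.getD_some]
      rw [pvMaxLen]
      simp only [List.foldl_cons]
      have hstep0 : pvBStep (0, 0) b0 = (b0 + 1, b0) := by
        simp [pvBStep]
        omega
      rw [hstep0, max_comm]

-- ===== VERDICT (by name: the statement is the Claim_ definition above) =====
theorem stockRun_spec : Claim_equal_stockRun := by
  intro prices _
  unfold Spec_stockRun
  exact stockRun_spec_aux prices
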